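-- pv_equiv track=rewrite | github.com/agairola/life-skills | skills/rental-prices/scripts/rental_prices.py | _filter_rents
-- ===== SOURCE A (Python) =====
-- def _filter_rents(rents: dict, prop_type: str, bedrooms: str | None) -> dict:
--     """Filter rents dict by property type and bedrooms."""
--     if prop_type == "all":
--         filtered = {}
--         for ptype in ("unit", "house"):
--             if ptype in rents:
--                 if bedrooms:
--                     key = f"{bedrooms}br"
--                     if key in rents[ptype]:
--                         filtered[ptype] = {key: rents[ptype][key]}
--                 else:
--                     filtered[ptype] = rents[ptype]
--         return filtered
--     else:
--         if prop_type not in rents: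
--             return {}
--         if bedrooms:
--             key = f"{bedrooms}br"
--             if key in rents[prop_type]:
--                 return {prop_type: {key: rents[prop_type][key]}}
--             return {}
--         return {prop_type: rents[prop_type]}
-- ===== SOURCE B (Python) =====
-- def _filter_rents(rents: dict, prop_type: str, bedrooms: str | None) -> dict:
--     """Filter rents dict by property type and bedrooms."""
--     key = f"{bedrooms}br" if bedrooms else None
--     wanted = {}
--     for t, v in rents.items():
--         if t == prop_type or (prop_type == "all" and t in ("unit", "house")):
--             if key is None:
--                 wanted[t] = v
--             elif key in v:
--                 wanted[t] = {key: v[key]}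
--     order = ("unit", "house") if prop_type == "all" else (prop_type,)
--     return {t: wanted[t] for t in order if t in wanted}
-- ===== Notes on version B (the rewrite author's own statement) =====
-- stated objective: alternative
-- what changed: Instead of probing the rents dict for each candidate property type with separate all/non-all branches, B makes one pass over all rents entries, narrowing each matching entry by bedrooms into an accumulator dict, and then emits the kept types in canonical order; Pre_ excludes association lists with duplicate type keys, which do not represent Python dicts and whose first-match lookup order is accidental.
import Mathlib
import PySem

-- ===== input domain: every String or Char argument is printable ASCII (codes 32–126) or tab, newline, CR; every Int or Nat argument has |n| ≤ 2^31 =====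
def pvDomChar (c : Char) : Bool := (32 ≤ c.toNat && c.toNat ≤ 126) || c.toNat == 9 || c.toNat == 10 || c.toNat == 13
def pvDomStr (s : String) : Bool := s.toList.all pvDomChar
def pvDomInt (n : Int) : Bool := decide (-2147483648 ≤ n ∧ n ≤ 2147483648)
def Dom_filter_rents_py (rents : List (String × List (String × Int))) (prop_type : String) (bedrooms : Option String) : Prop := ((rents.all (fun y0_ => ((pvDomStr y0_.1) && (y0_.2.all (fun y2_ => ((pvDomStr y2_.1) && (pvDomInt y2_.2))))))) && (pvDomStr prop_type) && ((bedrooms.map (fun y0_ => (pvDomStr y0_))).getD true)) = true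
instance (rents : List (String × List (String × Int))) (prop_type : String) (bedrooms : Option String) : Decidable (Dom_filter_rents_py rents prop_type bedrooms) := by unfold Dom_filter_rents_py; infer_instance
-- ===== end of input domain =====

-- B replaces A's per-type probing (two branches with separate dict lookups) by one scan over
-- all rents entries into an accumulator, then emits the kept types in canonical order (alternative).
-- ===== PORT A =====
-- Python truthiness of `bedrooms` (None and "" are falsy)
def pvBedTruthy (bedrooms : Option String) : Bool :=
  match bedrooms with
  | none => false
  | some s => !(s == "")

def filter_rents_py (rents : List (String × List (String × Int))) (prop_type : String) (bedrooms : Option String) : List (String × List (String × Int)) :=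
  if prop_type == "all" then
    (List.foldl (fun (filtered : PySem.Dict String (List (String × Int))) ptype =>
      match (PySem.Dict.mk rents).get? ptype with
      | none => filtered
      | some v =>
        if pvBedTruthy bedrooms then
          let key := bedrooms.getD "" ++ "br"
          match (PySem.Dict.mk v).get? key with
          | some x => filtered.insert ptype [(key, x)]
          | none => filtered
        else
          filtered.insert ptype v) PySem.Dict.empty ["unit", "house"]).items
  else
    match (PySem.Dict.mk rents).get? prop_type with
    | none => []
    | some v =>
      if pvBedTruthy bedrooms then
        let key := bedrooms.getD "" ++ "br"
        match (PySem.Dict.mk v).get? key with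
        | some x => [(prop_type, [(key, x)])]
        | none => []
      else
        [(prop_type, v)]

-- ===== PORT B =====
-- `key = f"{bedrooms}br" if bedrooms else None`
def pvKey (bedrooms : Option String) : Option String :=
  match bedrooms with
  | none => none
  | some s => if s == "" then none else some (s ++ "br")

-- the loop's entry test: `t == prop_type or (prop_type == "all" and t in ("unit","house"))`
def pvCond (t prop_type : String) : Bool :=
  t == prop_type || (prop_type == "all" && (t == "unit" || t == "house"))

-- the narrowed value stored for a kept entry: `v` if key is None, `{key: v[key]}` if key in v, nothing otherwise
def pvNarrow (key : Option String) (v : List (String × Int)) : Option (List (String × Int)) :=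
  match key with
  | none => some v
  | some k => ((PySem.Dict.mk v).get? k).map (fun x => [(k, x)])

-- one iteration of `for t, v in rents.items(): ...`
def pvStep (prop_type : String) (key : Option String)
    (w : PySem.Dict String (List (String × Int))) (p : String × List (String × Int)) :
    PySem.Dict String (List (String × Int)) :=
  if pvCond p.1 prop_type then
    match pvNarrow key p.2 with
    | some nv => w.insert p.1 nv
    | none => w
  else w

def filter_rents_py_alt (rents : List (String × List (String × Int))) (prop_type : String) (bedrooms : Option String) : List (String × List (String × Int)) :=
  let key := pvKey bedrooms
  let wanted := rents.foldl (pvStep prop_type key) PySem.Dict.empty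
  let order := if prop_type == "all" then ["unit", "house"] else [prop_type]
  order.filterMap (fun t => (wanted.get? t).map (fun v => (t, v)))

-- ===== PRECONDITION & SPEC =====
-- Pre_ excludes association lists with duplicate type keys: those do not represent a Python dict
-- (dict keys are unique), and which duplicate wins is an accident of the assoc-list reading.
def Pre_filter_rents_py (rents : List (String × List (String × Int))) (prop_type : String) (bedrooms : Option String) : Prop :=
  (rents.map Prod.fst).Nodup
instance (rents : List (String × List (String × Int))) (prop_type : String) (bedrooms : Option String) : Decidable (Pre_filter_rents_py rents prop_type bedrooms) := by unfold Pre_filter_rents_py; infer_instance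

def pvWitness_filter_rents_py : (List (String × List (String × Int))) × String × Option String :=
  ([("unit", [("2br", 1200)]), ("house", [("3br", 2000)])], "all", some "2")

def Spec_filter_rents_py (rents : List (String × List (String × Int))) (prop_type : String) (bedrooms : Option String) (out : List (String × List (String × Int))) : Prop := out = filter_rents_py_alt rents prop_type bedrooms
instance (rents : List (String × List (String × Int))) (prop_type : String) (bedrooms : Option String) (out : List (String × List (String × Int))) : Decidable (Spec_filter_rents_py rents prop_type bedrooms out) := by unfold Spec_filter_rents_py; infer_instance

-- ===== CLAIM =====
def Claim_equal_filter_rents_py : Prop := ∀ (rents : List (String × List (String × Int))) (prop_type : String) (bedrooms : Option String), Dom_filter_rents_py rents prop_type bedrooms → Pre_filter_rents_py rents prop_type bedrooms → Spec_filter_rents_py rents prop_type bedrooms (filter_rents_py rents prop_type bedrooms)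

-- ===== LEMMAS AND PROOFS =====

-- what B's accumulator holds for key t after the scan, in terms of first-match lookup in rents
lemma get?_foldl_pvStep (prop_type : String) (key : Option String)
    (rents : List (String × List (String × Int))) (hnd : (rents.map Prod.fst).Nodup)
    (w : PySem.Dict String (List (String × Int))) (t : String) :
    (rents.foldl (pvStep prop_type key) w).get? t =
      match (PySem.Dict.mk rents).get? t with
      | none => w.get? t
      | some v =>
        if pvCond t prop_type then
          match pvNarrow key v with
          | some nv => some nv
          | none => w.get? t
        else w.get? t := by
  induction rents generalizing w with
  | nil => simp [PySem.Dict.get?]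
  | cons hd tl ih =>
    obtain ⟨t0, v0⟩ := hd
    simp only [List.map_cons, List.nodup_cons] at hnd
    simp only [List.foldl_cons]
    rw [ih hnd.2]
    rw [PySem.Dict.get?_mk_cons]
    by_cases h : t0 = t
    · subst h
      have hnone : (PySem.Dict.mk tl).get? t0 = none := by
        rw [PySem.Dict.get?_eq_none_iff_not_mem_keys]
        simpa using hnd.1
      rw [hnone]
      simp only [BEq.rfl, if_true]
      unfold pvStep
      by_cases hc : pvCond t0 prop_type
      · simp only [hc, if_true]
        cases hn : pvNarrow key v0 with
        | none => simp
        | some nv => simp [PySem.Dict.get?_insert_self]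
      · simp [hc]
    · have hne : (t0 == t) = false := by simp [h]
      rw [hne]
      simp only [Bool.false_eq_true, if_false]
      have hw : (pvStep prop_type key w (t0, v0)).get? t = w.get? t := by
        unfold pvStep
        by_cases hc : pvCond t0 prop_type
        · simp only [hc, if_true]
          cases hn : pvNarrow key (t0, v0).2 with
          | none => rfl
          | some nv => exact PySem.Dict.get?_insert_of_ne _ _ (fun he => h he.symm)
        · simp [hc]
      rw [hw]

-- relate A's truthiness test and key to B's pvKey
lemma pvKey_none_iff (bedrooms : Option String) :
    pvKey bedrooms = none ↔ pvBedTruthy bedrooms = false := by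
  cases bedrooms with
  | none => simp [pvKey, pvBedTruthy]
  | some s => by_cases hs : s == "" <;> simp [pvKey, pvBedTruthy, hs]

lemma pvKey_some (bedrooms : Option String) (h : pvBedTruthy bedrooms = true) :
    pvKey bedrooms = some (bedrooms.getD "" ++ "br") := by
  cases bedrooms with
  | none => simp [pvBedTruthy] at h
  | some s =>
    by_cases hs : s == "" <;> simp [pvKey, pvBedTruthy, hs] at h ⊢

lemma get?_mk_nil (t : String) :
    (PySem.Dict.mk ([] : List (String × List (String × Int)))).get? t = none := rfl

-- ===== VERDICT =====
theorem filter_rents_py_spec : Claim_equal_filter_rents_py := by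
  intro rents prop_type bedrooms _ hpre
  unfold Spec_filter_rents_py filter_rents_py filter_rents_py_alt
  by_cases hall : prop_type == "all" <;>
    simp only [hall, if_true, Bool.false_eq_true, if_false]
  · -- prop_type == "all"
    have hpt : prop_type = "all" := by simpa using hall
    subst hpt
    have hu := get?_foldl_pvStep "all" (pvKey bedrooms) rents hpre PySem.Dict.empty "unit"
    have hh := get?_foldl_pvStep "all" (pvKey bedrooms) rents hpre PySem.Dict.empty "house"
    cases hbt : pvBedTruthy bedrooms with
    | false =>
      have hk : pvKey bedrooms = none := (pvKey_none_iff bedrooms).mpr hbt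
      cases hgu : (PySem.Dict.mk rents).get? "unit" <;>
      cases hgh : (PySem.Dict.mk rents).get? "house" <;>
      (try simp [hgu, hgh, hbt, hk, pvCond, pvNarrow, PySem.Dict.empty, PySem.Dict.get?_empty, get?_mk_nil] at hu hh) <;>
          simp [List.foldl, List.filterMap, hgu, hgh, hu, hh, hbt, hk, pvCond, pvNarrow,
            PySem.Dict.insert, PySem.Dict.contains, PySem.Dict.items, PySem.Dict.empty,
            PySem.Dict.get?_empty, get?_mk_nil]
    | true =>
      have hk : pvKey bedrooms = some (bedrooms.getD "" ++ "br") := pvKey_some bedrooms hbt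
      cases hgu : (PySem.Dict.mk rents).get? "unit" with
      | none =>
        cases hgh : (PySem.Dict.mk rents).get? "house" with
        | none =>
          (try simp [hgu, hgh, hbt, hk, pvCond, pvNarrow, PySem.Dict.empty, PySem.Dict.get?_empty, get?_mk_nil] at hu hh) <;>
          simp [List.foldl, List.filterMap, hgu, hgh, hu, hh, hbt, hk, pvCond, pvNarrow,
            PySem.Dict.insert, PySem.Dict.contains, PySem.Dict.items, PySem.Dict.empty,
            PySem.Dict.get?_empty, get?_mk_nil]
        | some vh =>
          cases hkh : (PySem.Dict.mk vh).get? (bedrooms.getD "" ++ "br") <;>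
          (try simp [hgu, hgh, hkh, hbt, hk, pvCond, pvNarrow, PySem.Dict.empty, PySem.Dict.get?_empty, get?_mk_nil] at hu hh) <;>
          simp [List.foldl, List.filterMap, hgu, hgh, hkh, hu, hh, hbt, hk, pvCond, pvNarrow,
            PySem.Dict.insert, PySem.Dict.contains, PySem.Dict.items, PySem.Dict.empty,
            PySem.Dict.get?_empty, get?_mk_nil]
      | some vu =>
        cases hgh : (PySem.Dict.mk rents).get? "house" with
        | none =>
          cases hku : (PySem.Dict.mk vu).get? (bedrooms.getD "" ++ "br") <;>
          (try simp [hgu, hgh, hku, hbt, hk, pvCond, pvNarrow, PySem.Dict.empty, PySem.Dict.get?_empty, get?_mk_nil] at hu hh) <;>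
          simp [List.foldl, List.filterMap, hgu, hgh, hku, hu, hh, hbt, hk, pvCond, pvNarrow,
            PySem.Dict.insert, PySem.Dict.contains, PySem.Dict.items, PySem.Dict.empty,
            PySem.Dict.get?_empty, get?_mk_nil]
        | some vh =>
          cases hku : (PySem.Dict.mk vu).get? (bedrooms.getD "" ++ "br") <;>
          cases hkh : (PySem.Dict.mk vh).get? (bedrooms.getD "" ++ "br") <;>
          (try simp [hgu, hgh, hku, hkh, hbt, hk, pvCond, pvNarrow, PySem.Dict.empty, PySem.Dict.get?_empty, get?_mk_nil] at hu hh) <;>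
          simp [List.foldl, List.filterMap, hgu, hgh, hku, hkh, hu, hh, hbt, hk, pvCond, pvNarrow,
            PySem.Dict.insert, PySem.Dict.contains, PySem.Dict.items, PySem.Dict.empty,
            PySem.Dict.get?_empty, get?_mk_nil]
  · -- prop_type ≠ "all"
    have hp := get?_foldl_pvStep prop_type (pvKey bedrooms) rents hpre PySem.Dict.empty prop_type
    cases hbt : pvBedTruthy bedrooms with
    | false =>
      have hk : pvKey bedrooms = none := (pvKey_none_iff bedrooms).mpr hbt
      cases hg : (PySem.Dict.mk rents).get? prop_type <;>
      (try simp [hg, hbt, hk, pvCond, pvNarrow, PySem.Dict.empty, PySem.Dict.get?_empty, get?_mk_nil] at hp) <;>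
        simp [List.filterMap, hall, hg, hp, hbt, hk, pvCond, pvNarrow, PySem.Dict.empty,
          PySem.Dict.get?_empty, get?_mk_nil]
    | true =>
      have hk : pvKey bedrooms = some (bedrooms.getD "" ++ "br") := pvKey_some bedrooms hbt
      cases hg : (PySem.Dict.mk rents).get? prop_type with
      | none =>
        (try simp [hg, hbt, hk, pvCond, pvNarrow, PySem.Dict.empty, PySem.Dict.get?_empty, get?_mk_nil] at hp) <;>
        simp [List.filterMap, hall, hg, hp, hbt, hk, pvCond, pvNarrow, PySem.Dict.empty,
          PySem.Dict.get?_empty, get?_mk_nil]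
      | some v =>
        cases hkv : (PySem.Dict.mk v).get? (bedrooms.getD "" ++ "br") <;>
        (try simp [hg, hkv, hbt, hk, pvCond, pvNarrow, PySem.Dict.empty, PySem.Dict.get?_empty, get?_mk_nil] at hp) <;>
        simp [List.filterMap, hall, hg, hkv, hp, hbt, hk, pvCond, pvNarrow, PySem.Dict.empty,
          PySem.Dict.get?_empty, get?_mk_nil]
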